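-- pv_equiv track=rewrite | github.com/guyi66/insight-research-room | analysis_pipeline.py | _format_evidence_index
-- ===== SOURCE A (Python) =====
-- from typing import Any, Callable, Dict, List, Optional
--
-- def _clip_text(text: Any, max_len: int = 220) -> str:
--     if text is None:
--         return ""
--     s = str(text).strip()
--     if len(s) <= max_len:
--         return s
--     return s[: max_len - 1] + "..."
--
-- def _format_evidence_index(evidence: List[Dict[str, Any]], max_items: int = 300, max_chars: int = 15000) -> str:
--     if not evidence:
--         return ""
--     lines: List[str] = []
--     for item in evidence[:max_items]:
--         line = (
--             f"{item.get('id')} | {item.get('type')} | {item.get('time')} | "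
--             f"{_clip_text(item.get('title'), 60)} | {_clip_text(item.get('summary'), 120)}"
--         )
--         lines.append(line)
--         if sum(len(l) for l in lines) > max_chars:
--             break
--     return "\n".join(lines)
-- ===== SOURCE B (Python) =====
-- from typing import Any, List, Dict
--
-- def _clip_text(text: Any, max_len: int = 220) -> str:
--     if text is None:
--         return ""
--     s = str(text).strip()
--     if len(s) <= max_len:
--         return s
--     return s[: max_len - 1] + "..."
--
-- def _fmt_line(item: Dict[str, Any]) -> str:
--     return (
--         f"{item.get('id')} | {item.get('type')} | {item.get('time')} | "
--         f"{_clip_text(item.get('title'), 60)} | {_clip_text(item.get('summary'), 120)}"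
--     )
--
-- def _format_evidence_index(evidence: List[Dict[str, Any]], max_items: int = 300, max_chars: int = 15000) -> str:
--     # Staged passes: (1) format ALL capped items up front, (2) scan prefix sums of
--     # line lengths to find the cut index, (3) join the kept prefix.
--     lines = [_fmt_line(item) for item in evidence[:max_items]]
--     cut = len(lines)
--     total = 0
--     for i, line in enumerate(lines):
--         total += len(line)
--         if total > max_chars:
--             cut = i + 1
--             break
--     return "\n".join(lines[:cut])
-- ===== Notes on version B (the rewrite author's own statement) =====
-- stated objective: alternative
-- what changed: B replaces A's fused loop (format one item, append, re-sum all line lengths, maybe break) with three staged passes: format every capped item up front into a list, scan running prefix sums of line lengths once to find the cut index, then join the kept slice; the per-iteration re-summation disappears, but formatting all capped items up front costs extra when the cut comes early, so no speed is claimed.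
import Mathlib
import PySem

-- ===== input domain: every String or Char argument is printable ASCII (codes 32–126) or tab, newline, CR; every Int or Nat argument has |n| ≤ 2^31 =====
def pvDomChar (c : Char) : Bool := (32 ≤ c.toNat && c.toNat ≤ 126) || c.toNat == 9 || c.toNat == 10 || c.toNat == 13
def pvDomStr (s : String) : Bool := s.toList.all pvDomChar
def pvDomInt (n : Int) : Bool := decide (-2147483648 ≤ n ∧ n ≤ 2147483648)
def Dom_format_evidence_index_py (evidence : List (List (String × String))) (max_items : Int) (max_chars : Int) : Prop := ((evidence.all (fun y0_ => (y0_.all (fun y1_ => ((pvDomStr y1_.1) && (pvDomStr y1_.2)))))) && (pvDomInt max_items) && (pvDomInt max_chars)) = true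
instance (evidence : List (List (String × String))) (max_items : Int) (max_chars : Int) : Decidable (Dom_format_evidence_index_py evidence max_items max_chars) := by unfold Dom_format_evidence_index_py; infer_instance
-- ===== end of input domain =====

-- B is a staged re-decomposition (alternative, no speed claimed): it formats all capped
-- items up front, scans prefix sums of line lengths once to find the cut index, then joins
-- the kept slice — instead of A's fused loop that appends, re-sums all lengths and breaks.


-- ===== PORT A =====
-- shared helpers: both Pythons build each line with the same f-string and _clip_text

-- f"{x}" for an Optional[str]: "None" for None, the string itself otherwise
def pvOptStr (o : Option String) : String :=
  match o with
  | none => "None"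
  | some s => s

-- _clip_text(text, max_len) for an Optional[str] argument
def pvClipText (text : Option String) (max_len : Int) : String :=
  match text with
  | none => ""
  | some t =>
    let s := PySem.Str.strip t
    if PySem.Str.len s ≤ max_len then s
    else PySem.Str.slice s none (some (max_len - 1)) ++ "..."

-- the f-string building one line from one item
def pvMkLine (item : List (String × String)) : String :=
  let d := PySem.Dict.ofList item
  pvOptStr (d.get? "id") ++ " | " ++ pvOptStr (d.get? "type") ++ " | " ++
    pvOptStr (d.get? "time") ++ " | " ++ pvClipText (d.get? "title") 60 ++ " | " ++
    pvClipText (d.get? "summary") 120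

-- A's loop: append the line to `lines`, then re-sum ALL line lengths and break if over budget
def pvLoopA (max_chars : Int) : List (List (String × String)) → List String → List String
  | [], lines => lines
  | item :: rest, lines =>
    let line := pvMkLine item
    let lines' := lines ++ [line]
    if lines'.foldl (fun acc l => acc + PySem.Str.len l) 0 > max_chars then lines'
    else pvLoopA max_chars rest lines'

def format_evidence_index_py (evidence : List (List (String × String))) (max_items : Int) (max_chars : Int) : String :=
  if evidence = [] then ""
  else PySem.Str.join "\n" (pvLoopA max_chars (PySem.List.slice evidence none (some max_items)) [])

-- ===== PORT B =====
-- B stage 2: the enumerate loop finding the cut index (i = index so far, total = running sum)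
def pvFindCut (max_chars : Int) : List String → Int → Int → Int
  | [], i, _ => i
  | line :: rest, i, total =>
    let total' := total + PySem.Str.len line
    if total' > max_chars then i + 1 else pvFindCut max_chars rest (i + 1) total'

def format_evidence_index_py_alt (evidence : List (List (String × String))) (max_items : Int) (max_chars : Int) : String :=
  let lines := (PySem.List.slice evidence none (some max_items)).map pvMkLine
  let cut := pvFindCut max_chars lines 0 0
  PySem.Str.join "\n" (PySem.List.slice lines none (some cut))

-- ===== PRECONDITION & SPEC =====
def Spec_format_evidence_index_py (evidence : List (List (String × String))) (max_items : Int) (max_chars : Int) (out : String) : Prop := out = format_evidence_index_py_alt evidence max_items max_chars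
instance (evidence : List (List (String × String))) (max_items : Int) (max_chars : Int) (out : String) : Decidable (Spec_format_evidence_index_py evidence max_items max_chars out) := by unfold Spec_format_evidence_index_py; infer_instance

-- ===== CLAIM =====
def Claim_equal_format_evidence_index_py : Prop := ∀ (evidence : List (List (String × String))) (max_items : Int) (max_chars : Int), Dom_format_evidence_index_py evidence max_items max_chars → Spec_format_evidence_index_py evidence max_items max_chars (format_evidence_index_py evidence max_items max_chars)

-- ===== LEMMAS AND PROOFS =====

-- the list of lines both programs keep, in recursive form (proof device only)
def pvTake (max_chars total : Int) : List String → List String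
  | [] => []
  | l :: rest =>
    l :: (if total + PySem.Str.len l > max_chars then [] else pvTake max_chars (total + PySem.Str.len l) rest)

-- the number of lines kept, in recursive form (proof device only)
def pvCutN (max_chars total : Int) : List String → Nat
  | [] => 0
  | l :: rest =>
    if total + PySem.Str.len l > max_chars then 1 else 1 + pvCutN max_chars (total + PySem.Str.len l) rest

-- re-summing all line lengths after an append = old sum + new length
theorem pv_sum_append (lines : List String) (l : String) :
    (lines ++ [l]).foldl (fun acc s => acc + PySem.Str.len s) 0
      = lines.foldl (fun acc s => acc + PySem.Str.len s) 0 + PySem.Str.len l := by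
  rw [List.foldl_append]
  rfl

-- A's loop keeps exactly the pvTake prefix of the formatted remaining items
theorem pv_loopA_take (max_chars : Int) (items : List (List (String × String))) :
    ∀ (lines : List String),
      pvLoopA max_chars items lines
        = lines ++ pvTake max_chars (lines.foldl (fun acc s => acc + PySem.Str.len s) 0)
            (items.map pvMkLine) := by
  induction items with
  | nil => intro lines; simp [pvLoopA, pvTake]
  | cons item rest ih =>
    intro lines
    simp only [pvLoopA, List.map_cons, pvTake, pv_sum_append]
    split_ifs with hc
    · simp
    · rw [ih (lines ++ [pvMkLine item]), pv_sum_append, List.append_assoc]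
      rfl

-- B's cut loop counts exactly pvCutN lines from its index offset
theorem pv_findCut_eq (max_chars : Int) (ls : List String) :
    ∀ (i total : Int), pvFindCut max_chars ls i total = i + (pvCutN max_chars total ls : Int) := by
  induction ls with
  | nil => intro i total; simp [pvFindCut, pvCutN]
  | cons l rest ih =>
    intro i total
    simp only [pvFindCut, pvCutN]
    split_ifs with hc
    · simp
    · rw [ih]; push_cast; ring

-- taking pvCutN lines is taking the pvTake prefix
theorem pv_take_cutN (max_chars : Int) (ls : List String) :
    ∀ (total : Int), ls.take (pvCutN max_chars total ls) = pvTake max_chars total ls := by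
  induction ls with
  | nil => intro total; simp [pvCutN, pvTake]
  | cons l rest ih =>
    intro total
    simp only [pvCutN, pvTake]
    split_ifs with hc
    · simp
    · rw [Nat.add_comm, List.take_succ_cons, ih]

-- ===== VERDICT =====
theorem format_evidence_index_py_spec : Claim_equal_format_evidence_index_py := by
  intro evidence max_items max_chars _
  unfold Spec_format_evidence_index_py format_evidence_index_py format_evidence_index_py_alt
  simp only [pv_loopA_take, pv_findCut_eq, List.nil_append, List.foldl_nil, zero_add,
    PySem.List.slice_to_natCast, pv_take_cutN]
  by_cases he : evidence = []
  · subst he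
    simp [PySem.List.slice, PySem.List.clampIdx, pvTake, PySem.Str.join]
  · simp [he]
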